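-- pv_equiv track=rewrite | github.com/denisianev2/match-me | data.py | compare_mentee
-- ===== SOURCE A (Python) =====
-- def compare_mentee(attribute_mentee, attribute_mentee_list):
--     attribute_mentee_matrix = []
--     for i in range(len(attribute_mentee)):
--         row = []
--         for j in range(len(attribute_mentee_list)):
--             if attribute_mentee_list[j] in set(attribute_mentee[i].split(";")):
--                 row.append(1)
--             else:
--                 row.append(0)
--         attribute_mentee_matrix.append(row)
--     return attribute_mentee_matrix
-- ===== SOURCE B (Python) =====
-- def compare_mentee(attribute_mentee, attribute_mentee_list):
--     # inverted index: value -> list of all its positions in attribute_mentee_list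
--     index = {}
--     for p, v in enumerate(attribute_mentee_list):
--         index[v] = index.get(v, []) + [p]
--     n = len(attribute_mentee_list)
--     matrix = []
--     for s in attribute_mentee:
--         row = [0] * n
--         for token in s.split(";"):
--             for p in index.get(token, []):
--                 row[p] = 1
--         matrix.append(row)
--     return matrix
-- ===== Notes on version B (the rewrite author's own statement) =====
-- stated objective: faster
-- what changed: Replaces A's per-cell test (which re-splits the row string and rebuilds a set for every column) with an inverted index from value to all its positions built once; each row starts as [0]*n and is filled by one pass over the row's split tokens, writing 1 at every indexed position.
import Mathlib
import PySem

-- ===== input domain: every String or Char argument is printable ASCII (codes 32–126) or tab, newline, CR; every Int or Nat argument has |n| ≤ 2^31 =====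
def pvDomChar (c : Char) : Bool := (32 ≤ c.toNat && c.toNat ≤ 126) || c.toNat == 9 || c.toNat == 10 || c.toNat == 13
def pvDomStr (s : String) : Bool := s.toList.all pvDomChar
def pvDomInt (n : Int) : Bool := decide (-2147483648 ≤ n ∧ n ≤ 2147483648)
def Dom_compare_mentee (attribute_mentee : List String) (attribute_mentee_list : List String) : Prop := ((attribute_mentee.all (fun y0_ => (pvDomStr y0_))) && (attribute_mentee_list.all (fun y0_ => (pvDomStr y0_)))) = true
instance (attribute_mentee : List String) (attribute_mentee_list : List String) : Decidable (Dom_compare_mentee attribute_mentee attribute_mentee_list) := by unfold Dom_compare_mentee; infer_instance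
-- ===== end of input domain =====

-- B replaces A's per-cell membership test (which re-splits the row string and rebuilds the set
-- for every column) with an inverted index from value to all its positions, built once, so each
-- row is filled by one pass over its tokens; same return value on every input.

-- ===== PORT A =====
def compare_mentee (attribute_mentee : List String) (attribute_mentee_list : List String) : List (List Int) :=
  (PySem.List.pyRange 0 attribute_mentee.length 1).foldl
    (fun mat i =>
      mat ++ [(PySem.List.pyRange 0 attribute_mentee_list.length 1).foldl
        (fun row j =>
          if (PySem.Set.ofList ((PySem.Str.split? (PySem.List.pyGetD attribute_mentee i "") ";").getD [])).contains
               (PySem.List.pyGetD attribute_mentee_list j "")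
          then row ++ [1]
          else row ++ [0]) []])
    []

-- ===== PORT B =====
-- index[v] = index.get(v, []) + [p]  over enumerate(attribute_mentee_list)
def pvIndex (xs : List String) : PySem.Dict String (List Int) :=
  (PySem.List.enumerate xs).foldl (fun d pv => d.modify pv.2 [] (· ++ [pv.1])) PySem.Dict.empty

def compare_mentee_alt (attribute_mentee : List String) (attribute_mentee_list : List String) : List (List Int) :=
  let index := pvIndex attribute_mentee_list
  let n := attribute_mentee_list.length
  attribute_mentee.foldl
    (fun mat s =>
      mat ++ [((PySem.Str.split? s ";").getD []).foldl
        (fun row token =>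
          -- row[p] = 1: positions p come from enumerate, so 0 ≤ p < n; pySetD is exact there
          (index.getD token []).foldl (fun r p => PySem.List.pySetD r p 1) row)
        (List.replicate n 0)])
    []

-- ===== PRECONDITION & SPEC =====
def Spec_compare_mentee (attribute_mentee : List String) (attribute_mentee_list : List String) (out : List (List Int)) : Prop := out = compare_mentee_alt attribute_mentee attribute_mentee_list
instance (attribute_mentee : List String) (attribute_mentee_list : List String) (out : List (List Int)) : Decidable (Spec_compare_mentee attribute_mentee attribute_mentee_list out) := by unfold Spec_compare_mentee; infer_instance

-- ===== CLAIM (what is proved, stated in full; the proofs are below) =====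
def Claim_equal_compare_mentee : Prop := ∀ (attribute_mentee : List String) (attribute_mentee_list : List String), Dom_compare_mentee attribute_mentee attribute_mentee_list → Spec_compare_mentee attribute_mentee attribute_mentee_list (compare_mentee attribute_mentee attribute_mentee_list)

-- ===== LEMMAS AND PROOFS =====

-- the positions list the inverted index stores for value v
def pvPos (xs : List String) (v : String) : List Int :=
  (((PySem.List.enumerate xs).map Prod.swap).filter (fun p => p.1 == v)).map (·.2)

theorem pvIndex_getD (xs : List String) (v : String) :
    (pvIndex xs).getD v [] = pvPos xs v := by
  have h : pvIndex xs =
      (((PySem.List.enumerate xs).map Prod.swap).foldl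
        (fun d p => d.modify p.1 [] (· ++ [p.2])) PySem.Dict.empty) := by
    rw [List.foldl_map]; rfl
  rw [h, pvPos, PySem.Dict.getD_foldl_modify_append, PySem.Dict.getD_empty, List.nil_append]

theorem mem_enumerate_iff {α : Type} (xs : List α) (s q : Int) (x : α) :
    (q, x) ∈ PySem.List.enumerate xs s ↔ ∃ j : Nat, q = s + j ∧ xs[j]? = some x := by
  induction xs generalizing s with
  | nil => simp [PySem.List.enumerate_nil]
  | cons y ys ih =>
    rw [PySem.List.enumerate_cons]
    simp only [List.mem_cons, ih, Prod.mk.injEq]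
    constructor
    · rintro (⟨rfl, rfl⟩ | ⟨j, rfl, hj⟩)
      · exact ⟨0, by simp⟩
      · exact ⟨j + 1, by push_cast; ring, by simpa using hj⟩
    · rintro ⟨j, rfl, hj⟩
      cases j with
      | zero => simp_all
      | succ j =>
        right
        exact ⟨j, ⟨by push_cast; ring, by simpa using hj⟩⟩

theorem mem_pvPos_iff (xs : List String) (v : String) (q : Int) :
    q ∈ pvPos xs v ↔ ∃ j : Nat, q = (j : Int) ∧ xs[j]? = some v := by
  unfold pvPos
  simp only [List.mem_map, List.mem_filter]
  constructor
  · rintro ⟨p, ⟨⟨⟨i, x⟩, he, rfl⟩, hv⟩, rfl⟩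
    obtain ⟨j, hij, hj⟩ := (mem_enumerate_iff xs 0 i x).1 he
    simp only [Prod.swap] at hv ⊢
    have hx : x = v := by simpa using hv
    exact ⟨j, by omega, by rw [← hx]; exact hj⟩
  · rintro ⟨j, rfl, hj⟩
    refine ⟨(v, (j : Int)), ⟨⟨((j : Int), v), ?_, rfl⟩, by simp⟩, rfl⟩
    exact (mem_enumerate_iff xs 0 j v).2 ⟨j, by simp, hj⟩

theorem natCast_mem_pvPos_iff (xs : List String) (v : String) (j : Nat) :
    ((j : Int) ∈ pvPos xs v) ↔ xs[j]? = some v := by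
  rw [mem_pvPos_iff]
  constructor
  · rintro ⟨k, hk, h⟩
    have : j = k := by omega
    subst this; exact h
  · intro h; exact ⟨j, rfl, h⟩

theorem setOnes_length (ps : List Int) (row : List Int) :
    (ps.foldl (fun r p => PySem.List.pySetD r p 1) row).length = row.length := by
  induction ps generalizing row with
  | nil => rfl
  | cons p ps ih => simp [List.foldl_cons, ih, PySem.List.length_pySetD]

theorem setOnes_getElem? (ps : List Int) (hps : ∀ p ∈ ps, 0 ≤ p) (row : List Int) (j : Nat) :
    (ps.foldl (fun r p => PySem.List.pySetD r p 1) row)[j]? =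
      if (j : Int) ∈ ps ∧ j < row.length then some 1 else row[j]? := by
  induction ps generalizing row with
  | nil => simp
  | cons p ps ih =>
    have hp : 0 ≤ p := hps p (List.mem_cons_self)
    rw [List.foldl_cons, PySem.List.pySetD_of_nonneg _ _ hp,
      ih (fun q hq => hps q (List.mem_cons_of_mem _ hq)), List.getElem?_set]
    simp only [List.length_set, List.mem_cons]
    by_cases h1 : (j : Int) ∈ ps <;> by_cases h2 : j < row.length <;>
      by_cases h3 : p.toNat = j <;> by_cases h4 : (j : Int) = p <;>
      simp_all <;> try omega

theorem rowB_getElem? (amL : List String) (tokens : List String) (row : List Int) (j : Nat) :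
    (tokens.foldl (fun row t => (pvPos amL t).foldl (fun r p => PySem.List.pySetD r p 1) row) row)[j]? =
      if (∃ t ∈ tokens, (j : Int) ∈ pvPos amL t) ∧ j < row.length then some 1 else row[j]? := by
  induction tokens generalizing row with
  | nil => simp
  | cons t ts ih =>
    rw [List.foldl_cons, ih, setOnes_length,
      setOnes_getElem? _ (fun p hp => by
        obtain ⟨k, rfl, -⟩ := (mem_pvPos_iff amL t p).1 hp
        exact Int.natCast_nonneg k) row j]
    by_cases h2 : j < row.length
    · by_cases hts : ∃ u ∈ ts, (j : Int) ∈ pvPos amL u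
      · obtain ⟨u, hu, hp⟩ := hts
        rw [if_pos ⟨⟨u, hu, hp⟩, h2⟩, if_pos ⟨⟨u, List.mem_cons_of_mem _ hu, hp⟩, h2⟩]
      · rw [if_neg (fun h => hts h.1)]
        by_cases ht : (j : Int) ∈ pvPos amL t
        · rw [if_pos ⟨ht, h2⟩, if_pos ⟨⟨t, List.mem_cons_self, ht⟩, h2⟩]
        · have hcons : ¬ ((∃ u ∈ t :: ts, (j : Int) ∈ pvPos amL u) ∧ j < row.length) := by
            rintro ⟨⟨u, hu, hp⟩, -⟩
            rcases List.mem_cons.1 hu with rfl | hu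
            · exact ht hp
            · exact hts ⟨u, hu, hp⟩
          rw [if_neg (fun h => ht h.1), if_neg hcons]
    · rw [if_neg (fun h => h2 h.2), if_neg (fun h => h2 h.2), if_neg (fun h => h2 h.2)]

theorem rowB_eq (amL : List String) (s : String) :
    ((PySem.Str.split? s ";").getD []).foldl
        (fun row token => ((pvIndex amL).getD token []).foldl (fun r p => PySem.List.pySetD r p 1) row)
        (List.replicate amL.length 0) =
      amL.map (fun v => if (PySem.Set.ofList ((PySem.Str.split? s ";").getD [])).contains v then (1:Int) else 0) := by
  have hfun : (fun (row : List Int) (token : String) =>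
        ((pvIndex amL).getD token []).foldl (fun r p => PySem.List.pySetD r p 1) row)
      = (fun row token => (pvPos amL token).foldl (fun r p => PySem.List.pySetD r p 1) row) := by
    funext row token; rw [pvIndex_getD]
  rw [hfun]
  apply List.ext_getElem?
  intro j
  rw [rowB_getElem?]
  simp only [List.length_replicate, List.getElem?_map]
  by_cases hj : j < amL.length
  · have hg : amL[j]? = some amL[j] := List.getElem?_eq_getElem hj
    by_cases hm : amL[j] ∈ (PySem.Str.split? s ";").getD []
    · have hc : ∃ t ∈ (PySem.Str.split? s ";").getD [], (j : Int) ∈ pvPos amL t :=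
        ⟨amL[j], hm, (natCast_mem_pvPos_iff amL _ j).2 hg⟩
      simp [hc, hj, PySem.Set.contains, PySem.Set.mem_ofList, hm]
    · have hc : ¬ ∃ t ∈ (PySem.Str.split? s ";").getD [], (j : Int) ∈ pvPos amL t := by
        rintro ⟨t, ht, hjt⟩
        have := (natCast_mem_pvPos_iff amL t j).1 hjt
        rw [hg] at this
        injection this with h2
        subst h2
        exact hm ht
      simp [hc, hj, PySem.Set.contains, PySem.Set.mem_ofList, hm]
  · simp [hj]

theorem foldl_ite_append {α : Type} (c : α → Bool) (l : List α) (acc : List Int) :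
    l.foldl (fun row v => if c v then row ++ [(1:Int)] else row ++ [0]) acc =
      acc ++ l.map (fun v => if c v then (1:Int) else 0) := by
  have h : (fun (row : List Int) v => if c v then row ++ [(1:Int)] else row ++ [0])
      = fun row v => row ++ [if c v then (1:Int) else 0] := by
    funext row v; split <;> rfl
  rw [h, PySem.List.foldl_append_singleton_eq_map]

theorem A_eq (am amL : List String) :
    compare_mentee am amL =
      am.map (fun s => amL.map (fun v =>
        if (PySem.Set.ofList ((PySem.Str.split? s ";").getD [])).contains v then (1:Int) else 0)) := by
  unfold compare_mentee
  rw [PySem.List.foldl_pyRange_zero_pyGetD' am ""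
    (fun mat s => mat ++ [(PySem.List.pyRange 0 amL.length 1).foldl
      (fun row j => if (PySem.Set.ofList ((PySem.Str.split? s ";").getD [])).contains
        (PySem.List.pyGetD amL j "") then row ++ [1] else row ++ [0]) []]) []]
  have hrow : ∀ s : String,
      (PySem.List.pyRange 0 amL.length 1).foldl
        (fun row j => if (PySem.Set.ofList ((PySem.Str.split? s ";").getD [])).contains
          (PySem.List.pyGetD amL j "") then row ++ [1] else row ++ [0]) []
      = amL.map (fun v => if (PySem.Set.ofList ((PySem.Str.split? s ";").getD [])).contains v then (1:Int) else 0) := by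
    intro s
    rw [PySem.List.foldl_pyRange_zero_pyGetD' amL ""
      (fun row v => if (PySem.Set.ofList ((PySem.Str.split? s ";").getD [])).contains v
        then row ++ [1] else row ++ [0]) [],
      foldl_ite_append, List.nil_append]
  simp only [hrow, PySem.List.foldl_append_singleton_eq_map, List.nil_append]

theorem B_eq (am amL : List String) :
    compare_mentee_alt am amL =
      am.map (fun s => amL.map (fun v =>
        if (PySem.Set.ofList ((PySem.Str.split? s ";").getD [])).contains v then (1:Int) else 0)) := by
  simp only [compare_mentee_alt, PySem.List.foldl_append_singleton_eq_map, List.nil_append]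
  exact List.map_congr_left (fun s _ => rowB_eq amL s)

-- ===== VERDICT (by name: the statement is the Claim_ definition above) =====
theorem compare_mentee_spec : Claim_equal_compare_mentee := by
  intro am amL _
  unfold Spec_compare_mentee
  rw [A_eq, B_eq]
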